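-- pv_equiv track=rewrite | github.com/Keff789/ONNX-Splitpoint-Tool | onnx_splitpoint_tool/metrics.py | peak_activation_memory_per_boundary
-- ===== SOURCE A (Python) =====
-- from typing import Dict, Iterable, List, Optional, Tuple
--
-- def peak_activation_memory_per_boundary(costs_bytes: List[int]) -> Tuple[List[int], List[int], List[int]]:
--     """Derive *approximate* peak activation memory for left/right partitions per boundary.
--
--     We interpret the per-boundary live activation size L[b] as:
--       L[b] = sum(bytes(v)) for all tensors v that are alive across boundary b
--
--     In this tool, L[b] is identical to Comm(b) (crossing activation bytes) because
--     both are derived from the same producer->last-consumer value spans.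
--
--     For a boundary b:
--       - part1 executes nodes [0..b]  and ends at boundary b
--       - part2 executes nodes [b+1..] and starts at boundary b
--
--     Therefore, an upper-bound approximation for the peak activation memory needed is:
--       peak_left[b]  = max_{i <= b} L[i]
--       peak_right[b] = max_{i >= b} L[i]
--       peak_max[b]   = max(peak_left[b], peak_right[b])
--
--     Notes
--     -----
--     - This is a coarse estimate: it does not model buffer reuse, in-place ops,
--       streaming of cut tensors, recomputation, or weight/parameter memory.
--     - Unknown activation sizes are treated as 0 bytes (lower bound), consistent
--       with Comm(b) handling in the rest of the tool.
--     """
--     if not costs_bytes: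
--         return [], [], []
--
--     L = [int(max(0, int(x))) for x in costs_bytes]
--     M = len(L)
--
--     peak_left: List[int] = [0] * M
--     run = 0
--     for i in range(M):
--         run = max(run, int(L[i]))
--         peak_left[i] = int(run)
--
--     peak_right: List[int] = [0] * M
--     run = 0
--     for i in range(M - 1, -1, -1):
--         run = max(run, int(L[i]))
--         peak_right[i] = int(run)
--
--     peak_max = [int(max(peak_left[i], peak_right[i])) for i in range(M)]
--     return peak_left, peak_right, peak_max
-- ===== SOURCE B (Python) =====
-- from typing import List, Tuple
--
--
-- def _dc(xs: List[int]) -> Tuple[List[int], List[int], int]: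
--     """Divide and conquer: returns (prefix maxima, suffix maxima, overall max) of xs (nonempty)."""
--     if len(xs) == 1:
--         return [xs[0]], [xs[0]], xs[0]
--     k = len(xs) // 2
--     pa, sa, ma = _dc(xs[:k])
--     pb, sb, mb = _dc(xs[k:])
--     return (pa + [max(ma, v) for v in pb],
--             [max(mb, v) for v in sa] + sb,
--             max(ma, mb))
--
--
-- def peak_activation_memory_per_boundary(costs_bytes: List[int]) -> Tuple[List[int], List[int], List[int]]:
--     if not costs_bytes:
--         return [], [], []
--     L = [max(0, int(x)) for x in costs_bytes]
--     peak_left, peak_right, m = _dc(L)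
--     # prefix 0..b and suffix b..end jointly cover every index, so peak_max is constant
--     return peak_left, peak_right, [m] * len(L)
-- ===== Notes on version B (the rewrite author's own statement) =====
-- stated objective: alternative
-- what changed: Replaces A's linear running-max scans by a divide-and-conquer recursion that splits the list in half, recursively computes (prefix maxima, suffix maxima, overall max) of each half and merges them, and returns peak_max as the constant list [overall max]*n.
import Mathlib
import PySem

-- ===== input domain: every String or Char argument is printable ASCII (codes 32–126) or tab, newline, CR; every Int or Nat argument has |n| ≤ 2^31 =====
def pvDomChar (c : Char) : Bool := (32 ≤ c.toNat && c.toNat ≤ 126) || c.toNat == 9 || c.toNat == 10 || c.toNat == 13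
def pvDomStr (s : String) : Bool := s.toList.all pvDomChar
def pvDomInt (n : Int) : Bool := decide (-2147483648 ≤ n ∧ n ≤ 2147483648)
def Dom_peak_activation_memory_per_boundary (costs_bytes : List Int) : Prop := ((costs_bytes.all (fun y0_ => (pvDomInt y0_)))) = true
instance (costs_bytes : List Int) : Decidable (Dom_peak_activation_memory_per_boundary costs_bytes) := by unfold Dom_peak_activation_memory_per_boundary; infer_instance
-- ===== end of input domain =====

-- B replaces A's linear running-max scans by a divide-and-conquer recursion merging half-results
-- (alternative decomposition; same results, not claimed faster).

-- ===== PORT A =====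
-- the body of both of A's index loops: run = max(run, L[i]); arr[i] = run
def pvStep (L : List Int) (st : List Int × Int) (i : Int) : List Int × Int :=
  let run := max st.2 (PySem.List.pyGetD L i 0)
  (st.1.set i.toNat run, run)

def peak_activation_memory_per_boundary (costs_bytes : List Int) : List Int × List Int × List Int :=
  if costs_bytes = [] then ([], [], []) else
  let L := costs_bytes.map (fun x => max 0 x)
  let M : Int := (L.length : Int)
  let left := (PySem.List.pyRange 0 M 1).foldl (pvStep L) (List.replicate L.length 0, 0)
  let right := (PySem.List.pyRange (M - 1) (-1) (-1)).foldl (pvStep L) (List.replicate L.length 0, 0)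
  let peak_max := (PySem.List.pyRange 0 M 1).map
    (fun i => max (PySem.List.pyGetD left.1 i 0) (PySem.List.pyGetD right.1 i 0))
  (left.1, right.1, peak_max)

-- ===== PORT B =====
-- _dc: split in half, recurse, merge (prefix maxima, suffix maxima, overall max)
def pvDC : List Int → List Int × List Int × Int
  | [] => ([], [], 0)
  | [x] => ([x], [x], x)
  | x :: y :: rest =>
      let xs := x :: y :: rest
      let k := xs.length / 2
      let a := pvDC (xs.take k)
      let b := pvDC (xs.drop k)
      (a.1 ++ b.1.map (fun v => max a.2.2 v),
       a.2.1.map (fun v => max b.2.2 v) ++ b.2.1,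
       max a.2.2 b.2.2)
termination_by xs => xs.length
decreasing_by
  · simp [List.length_take]; omega
  · simp [List.length_drop]; omega

def peak_activation_memory_per_boundary_alt (costs_bytes : List Int) : List Int × List Int × List Int :=
  if costs_bytes = [] then ([], [], []) else
  let L := costs_bytes.map (fun x => max 0 x)
  let d := pvDC L
  (d.1, d.2.1, List.replicate L.length d.2.2)

-- ===== PRECONDITION & SPEC =====
def Spec_peak_activation_memory_per_boundary (costs_bytes : List Int) (out : List Int × List Int × List Int) : Prop := out = peak_activation_memory_per_boundary_alt costs_bytes
instance (costs_bytes : List Int) (out : List Int × List Int × List Int) : Decidable (Spec_peak_activation_memory_per_boundary costs_bytes out) := by unfold Spec_peak_activation_memory_per_boundary; infer_instance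

-- ===== CLAIM (what is proved, stated in full; the proofs are below) =====
def Claim_equal_peak_activation_memory_per_boundary : Prop := ∀ (costs_bytes : List Int), Dom_peak_activation_memory_per_boundary costs_bytes → Spec_peak_activation_memory_per_boundary costs_bytes (peak_activation_memory_per_boundary costs_bytes)

-- ===== LEMMAS AND PROOFS =====

-- running maxima with seed run (the value A's forward loop fills in)
def pvScanFrom (run : Int) : List Int → List Int
  | [] => []
  | x :: xs => (max run x) :: pvScanFrom (max run x) xs

-- suffix running maxima, the value A's backward loop fills in
def pvSufScan (run : Int) (xs : List Int) : List Int := (pvScanFrom run xs.reverse).reverse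

theorem pvScanFrom_length (run : Int) (xs : List Int) : (pvScanFrom run xs).length = xs.length := by
  induction xs generalizing run with
  | nil => rfl
  | cons x xs ih => simp [pvScanFrom, ih]

theorem pv_take_set (l : List Int) : ∀ (n : Nat) (v : Int), n < l.length →
    (l.set n v).take (n + 1) = l.take n ++ [v] := by
  induction l with
  | nil => intro n v h; simp at h
  | cons a l ih =>
    intro n v h
    cases n with
    | zero => simp
    | succ n => simp [ih n v (by simpa using h)]

theorem pv_drop_set (l : List Int) : ∀ (n : Nat) (v : Int), n < l.length →
    (l.set n v).drop n = v :: l.drop (n + 1) := by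
  induction l with
  | nil => intro n v h; simp at h
  | cons a l ih =>
    intro n v h
    cases n with
    | zero => simp
    | succ n => simpa using ih n v (by simpa using h)

-- A's forward loop computes pvScanFrom run on the not-yet-processed suffix
theorem pv_left_inv (rest : List Int) : ∀ (done acc : List Int) (run : Int),
    acc.length = done.length + rest.length →
    ((PySem.List.pyRange (done.length : Int) ((done.length : Int) + (rest.length : Int)) 1).foldl
        (pvStep (done ++ rest)) (acc, run)).1
      = acc.take done.length ++ pvScanFrom run rest := by
  induction rest with
  | nil =>
    intro done acc run hlen
    have hnil : (done.length : Int) + (([] : List Int).length : Int) ≤ (done.length : Int) := by simp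
    rw [PySem.List.pyRange_one_eq_nil hnil]
    have htake : acc.take done.length = acc := List.take_of_length_le (by simpa using hlen.le)
    simp [pvScanFrom, htake]
  | cons x xs ih =>
    intro done acc run hlen
    have hlt : (done.length : Int) < (done.length : Int) + ((x :: xs).length : Int) := by
      simp only [List.length_cons]; push_cast; omega
    rw [PySem.List.pyRange_one_cons hlt]
    simp only [List.foldl_cons]
    have hget : PySem.List.pyGetD (done ++ x :: xs) (done.length : Int) 0 = x := by
      simp [PySem.List.pyGetD_natCast, List.getD_eq_getElem?_getD]
    have hstep : pvStep (done ++ x :: xs) (acc, run) (done.length : Int)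
        = (acc.set done.length (max run x), max run x) := by
      simp [pvStep, hget]
    rw [hstep]
    have e1 : (done.length : Int) + 1 = (((done ++ [x]).length : Nat) : Int) := by
      simp
    have e2 : (done.length : Int) + ((x :: xs).length : Int)
        = (((done ++ [x]).length : Nat) : Int) + ((xs.length : Nat) : Int) := by
      simp; omega
    rw [e1, e2]
    have happ : done ++ x :: xs = (done ++ [x]) ++ xs := by simp
    rw [happ]
    rw [ih (done ++ [x]) (acc.set done.length (max run x)) (max run x)
      (by simp at hlen ⊢; omega)]
    rw [List.length_append, List.length_singleton,
      pv_take_set acc done.length (max run x) (by simp at hlen; omega)]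
    simp [pvScanFrom]

-- A's backward loop computes pvSufScan run on the processed prefix
theorem pv_right_inv (rest : List Int) : ∀ (tail acc : List Int) (run : Int),
    acc.length = rest.length + tail.length →
    ((PySem.List.pyRange ((rest.length : Int) - 1) (-1) (-1)).foldl
        (pvStep (rest ++ tail)) (acc, run)).1
      = pvSufScan run rest ++ acc.drop rest.length := by
  induction rest using List.reverseRecOn with
  | nil =>
    intro tail acc run hlen
    have hnil : ((([] : List Int).length : Nat) : Int) - 1 ≤ (-1 : Int) := by simp
    rw [PySem.List.pyRange_neg_one_eq_nil hnil]
    simp [pvSufScan, pvScanFrom]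
  | append_singleton ys y ih =>
    intro tail acc run hlen
    have hstart : (((ys ++ [y]).length : Nat) : Int) - 1 = (ys.length : Int) := by
      simp
    rw [hstart]
    have hlt : (-1 : Int) < (ys.length : Int) := by omega
    rw [PySem.List.pyRange_neg_one_cons hlt]
    simp only [List.foldl_cons]
    have hstep : pvStep (ys ++ [y] ++ tail) (acc, run) (ys.length : Int)
        = (acc.set ys.length (max run y), max run y) := by
      simp [pvStep]
    rw [hstep]
    have happ : ys ++ [y] ++ tail = ys ++ ([y] ++ tail) := by simp
    rw [happ]
    rw [ih ([y] ++ tail) (acc.set ys.length (max run y)) (max run y)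
      (by simp at hlen ⊢; omega)]
    rw [pv_drop_set acc ys.length (max run y) (by simp at hlen; omega)]
    have hsuf : pvSufScan run (ys ++ [y]) = pvSufScan (max run y) ys ++ [max run y] := by
      simp [pvSufScan, pvScanFrom]
    simp [hsuf]

theorem pv_foldl_max_shift (l : List Int) : ∀ (a b : Int),
    l.foldl max (max a b) = max (l.foldl max a) b := by
  induction l with
  | nil => intro a b; rfl
  | cons x xs ih =>
    intro a b
    have h : max (max a b) x = max (max a x) b := by
      rw [max_assoc, max_comm b x, ← max_assoc]
    simp only [List.foldl_cons]
    rw [h, ih]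

theorem pv_foldl_max_reverse (l : List Int) : ∀ (a : Int),
    l.reverse.foldl max a = l.foldl max a := by
  induction l with
  | nil => intro a; rfl
  | cons x xs ih =>
    intro a
    simp only [List.reverse_cons, List.foldl_append, List.foldl_cons, List.foldl_nil, ih]
    rw [← pv_foldl_max_shift]

theorem pv_init_le_foldl_max (l : List Int) : ∀ (a : Int), a ≤ l.foldl max a := by
  induction l with
  | nil => intro a; exact le_refl a
  | cons x xs ih => intro a; exact le_trans (le_max_left a x) (ih _)

theorem pv_mem_le_foldl_max (l : List Int) : ∀ (a x : Int), x ∈ l → x ≤ l.foldl max a := by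
  induction l with
  | nil => intro a x h; simp at h
  | cons y ys ih =>
    intro a x h
    rcases List.mem_cons.mp h with h | h
    · subst h; exact le_trans (le_max_right a x) (pv_init_le_foldl_max ys _)
    · exact ih _ x h

theorem pvScanFrom_getElem (xs : List Int) : ∀ (run : Int) (k : Nat) (h : k < xs.length),
    (pvScanFrom run xs)[k]'(by rw [pvScanFrom_length]; exact h)
      = (xs.take (k + 1)).foldl max run := by
  induction xs with
  | nil => intro run k h; simp at h
  | cons x xs ih =>
    intro run k h
    cases k with
    | zero => simp [pvScanFrom]
    | succ k => simpa [pvScanFrom] using ih (max run x) k (by simpa using h)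

theorem pvSufScan_length (run : Int) (xs : List Int) : (pvSufScan run xs).length = xs.length := by
  simp [pvSufScan, pvScanFrom_length]

theorem pvSufScan_getElem (xs : List Int) (run : Int) (k : Nat) (h : k < xs.length) :
    (pvSufScan run xs)[k]'(by rw [pvSufScan_length]; exact h)
      = (xs.drop k).foldl max run := by
  unfold pvSufScan
  rw [List.getElem_reverse]
  rw [pvScanFrom_getElem xs.reverse run _ (by simp [pvScanFrom_length]; omega)]
  have e : (pvScanFrom run xs.reverse).length - 1 - k + 1 = xs.length - k := by
    rw [pvScanFrom_length, List.length_reverse]; omega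
  rw [e, ← List.reverse_drop, pv_foldl_max_reverse]

-- scanFrom with seed max m r is the max-m image of scanFrom with seed r
theorem pv_scanFrom_max_map (xs : List Int) : ∀ (m r : Int),
    pvScanFrom (max m r) xs = (pvScanFrom r xs).map (fun v => max m v) := by
  induction xs with
  | nil => intro m r; rfl
  | cons x l ih =>
    intro m r
    have h : max (max m r) x = max m (max r x) := max_assoc m r x
    simp only [pvScanFrom, List.map_cons, h, ih]

-- scanFrom splits on append: second half restarts from the first half's running max
theorem pv_scanFrom_append (A : List Int) : ∀ (B : List Int) (r : Int),
    pvScanFrom r (A ++ B) = pvScanFrom r A ++ pvScanFrom (A.foldl max r) B := by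
  induction A with
  | nil => intro B r; rfl
  | cons x l ih => intro B r; simp only [List.cons_append, pvScanFrom, List.foldl_cons, ih]

theorem pv_foldl_max_append (A B : List Int) (hA : 0 ≤ A.foldl max 0) :
    (A ++ B).foldl max 0 = max (A.foldl max 0) (B.foldl max 0) := by
  rw [List.foldl_append]
  conv_lhs => rw [(max_eq_right hA).symm]
  rw [pv_foldl_max_shift, max_comm]

-- scanFrom with a nonnegative seed m is the max-m image of scanFrom 0
theorem pv_scanFrom_seed (m : Int) (hm : 0 ≤ m) (xs : List Int) :
    pvScanFrom m xs = (pvScanFrom 0 xs).map (fun v => max m v) := by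
  have h := pv_scanFrom_max_map xs m 0
  rwa [max_eq_left hm] at h

theorem pv_sufScan_append (A B : List Int) (hB : 0 ≤ B.foldl max 0) :
    pvSufScan 0 (A ++ B)
      = (pvSufScan 0 A).map (fun v => max (B.foldl max 0) v) ++ pvSufScan 0 B := by
  unfold pvSufScan
  rw [List.reverse_append, pv_scanFrom_append, List.reverse_append, pv_foldl_max_reverse,
    pv_scanFrom_seed _ hB, List.map_reverse]

-- divide-and-conquer computes (scanFrom 0, sufScan 0, foldl max 0) on nonnegative lists
theorem pvDC_spec (L : List Int) :
    (∀ x ∈ L, 0 ≤ x) → pvDC L = (pvScanFrom 0 L, pvSufScan 0 L, L.foldl max 0) := by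
  induction L using pvDC.induct with
  | case1 => intro _; simp [pvDC, pvScanFrom, pvSufScan]
  | case2 x =>
    intro h
    have hx : 0 ≤ x := h x (by simp)
    simp [pvDC, pvScanFrom, pvSufScan, max_eq_right hx]
  | case3 x y rest xs k iha ihb =>
    intro h
    have hAn : ∀ v ∈ (x :: y :: rest).take k, 0 ≤ v :=
      fun v hv => h v (List.mem_of_mem_take hv)
    have hBn : ∀ v ∈ (x :: y :: rest).drop k, 0 ≤ v :=
      fun v hv => h v (List.mem_of_mem_drop hv)
    have ha := iha hAn
    have hb := ihb hBn
    have hsplit : x :: y :: rest = (x :: y :: rest).take k ++ (x :: y :: rest).drop k :=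
      (List.take_append_drop k _).symm
    have hmA : 0 ≤ ((x :: y :: rest).take k).foldl max 0 := pv_init_le_foldl_max _ 0
    have hmB : 0 ≤ ((x :: y :: rest).drop k).foldl max 0 := pv_init_le_foldl_max _ 0
    rw [pvDC]
    rw [ha, hb]
    refine Prod.ext ?_ (Prod.ext ?_ ?_)
    · conv_rhs => rw [hsplit]
      rw [pv_scanFrom_append, pv_scanFrom_seed _ hmA]
    · conv_rhs => rw [hsplit]
      rw [pv_sufScan_append _ _ hmB]
    · conv_rhs => rw [hsplit]
      rw [pv_foldl_max_append _ _ hmA]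

theorem pv_cover_max (L : List Int) (k : Nat) (hk : k < L.length) :
    max ((L.take (k + 1)).foldl max 0) ((L.drop k).foldl max 0) = L.foldl max 0 := by
  have hLk : L[k] ∈ L.take (k + 1) := by
    have hgt : (L.take (k + 1))[k]'(by simp; omega) = L[k] := List.getElem_take
    rw [← hgt]; exact List.getElem_mem _
  have hdrop : L.drop k = L[k] :: L.drop (k + 1) := List.drop_eq_getElem_cons hk
  have hA1 : max 0 L[k] ≤ (L.take (k + 1)).foldl max 0 :=
    max_le (pv_init_le_foldl_max _ 0) (pv_mem_le_foldl_max _ 0 _ hLk)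
  have hdropf : (L.drop k).foldl max 0 = (L.drop (k + 1)).foldl max (max 0 L[k]) := by
    rw [hdrop]; rfl
  rw [hdropf, max_comm ((L.take (k + 1)).foldl max 0) _, ← pv_foldl_max_shift,
    max_comm (max 0 L[k]) _, max_eq_left hA1]
  conv_rhs => rw [← List.take_append_drop (k + 1) L]
  rw [List.foldl_append]

-- ===== VERDICT (by name: the statement is the Claim_ definition above) =====
theorem peak_activation_memory_per_boundary_spec : Claim_equal_peak_activation_memory_per_boundary := by
  intro costs _
  unfold Spec_peak_activation_memory_per_boundary
  unfold peak_activation_memory_per_boundary peak_activation_memory_per_boundary_alt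
  by_cases hc : costs = []
  · simp [hc]
  · simp only [if_neg hc]
    set L := costs.map (fun x => max 0 x) with hL
    have h0 : ∀ x ∈ L, 0 ≤ x := by
      intro x hx
      rcases List.mem_map.mp hx with ⟨y, _, rfl⟩
      exact le_max_left 0 y
    have hdc := pvDC_spec L h0
    have hleft : ((PySem.List.pyRange 0 ((L.length : Nat) : Int) 1).foldl (pvStep L)
        (List.replicate L.length 0, 0)).1 = pvScanFrom 0 L := by
      have := pv_left_inv L [] (List.replicate L.length 0) 0 (by simp)
      simpa using this
    have hright : ((PySem.List.pyRange (((L.length : Nat) : Int) - 1) (-1) (-1)).foldl (pvStep L)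
        (List.replicate L.length 0, 0)).1 = pvSufScan 0 L := by
      have := pv_right_inv L [] (List.replicate L.length 0) 0 (by simp)
      simpa using this
    have h3 : (PySem.List.pyRange 0 ((L.length : Nat) : Int) 1).map
        (fun i => max (PySem.List.pyGetD (pvScanFrom 0 L) i 0)
                      (PySem.List.pyGetD (pvSufScan 0 L) i 0))
        = List.replicate L.length (L.foldl max 0) := by
      apply List.ext_getElem?
      intro k
      by_cases hk : k < L.length
      · rw [PySem.List.getElem?_map_pyRange_zero _ _ _ hk]
        rw [List.getElem?_replicate_of_lt hk]
        congr 1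
        have hpl : PySem.List.pyGetD (pvScanFrom 0 L) (k : Int) 0
            = (L.take (k + 1)).foldl max 0 := by
          rw [PySem.List.pyGetD_natCast,
            List.getD_eq_getElem _ _ (by rw [pvScanFrom_length]; exact hk)]
          exact pvScanFrom_getElem L 0 k hk
        have hpr : PySem.List.pyGetD (pvSufScan 0 L) (k : Int) 0
            = (L.drop k).foldl max 0 := by
          rw [PySem.List.pyGetD_natCast,
            List.getD_eq_getElem _ _ (by rw [pvSufScan_length]; exact hk)]
          exact pvSufScan_getElem L 0 k hk
        rw [hpl, hpr, pv_cover_max L k hk]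
      · have hlen1 : ((PySem.List.pyRange 0 ((L.length : Nat) : Int) 1).map
            (fun i => max (PySem.List.pyGetD (pvScanFrom 0 L) i 0)
                          (PySem.List.pyGetD (pvSufScan 0 L) i 0))).length = L.length := by
          simp [PySem.List.length_pyRange_one]
        rw [List.getElem?_eq_none (by rw [hlen1]; omega)]
        rw [List.getElem?_eq_none (by simp; omega)]
    rw [hleft, hright, h3, hdc]
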